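-- pv_equiv track=rewrite | github.com/BruceDLong/CodeDog | codeDogParser.py | BlowPOPMacro
-- ===== SOURCE A (Python) =====
-- def isCID(ch):
--     return (ch.isalnum() or ch=='_')
--
-- def BlowPOPMacro(replacement):
--     updatedStr = ""
--     scanMode='identifier'
--     for ch in replacement:
--         if scanMode=='identifier':
--             if isCID(ch): updatedStr += ch
--             else:
--                 updatedStr += ' + "'+ch
--                 scanMode='filler'
--         elif scanMode=='filler':
--             if not (ch.isalpha() or ch=='_'): updatedStr += ch
--             else:
--                 updatedStr += '" + '+ch
--                 scanMode='identifier'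
--     if scanMode=='filler': updatedStr+='" '
--     return updatedStr
-- ===== SOURCE B (Python) =====
-- def BlowPOPMacro(replacement):
--     # Pass 1: tokenize into alternating runs: identifier runs [A-Za-z0-9_]+
--     # (digits count as identifier chars here) and filler runs [^A-Za-z_]+
--     # (digits stay in a filler run once it has started).
--     tokens = []
--     i, n = 0, len(replacement)
--     ident = True
--     while i < n:
--         j = i
--         if ident:
--             while j < n and (replacement[j].isalnum() or replacement[j] == '_'):
--                 j += 1
--         else:
--             while j < n and not (replacement[j].isalpha() or replacement[j] == '_'):
--                 j += 1
--         tokens.append(replacement[i:j])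
--         ident = not ident
--         i = j
--     # Pass 2: join the runs with the quote punctuation.
--     parts = []
--     for k, tok in enumerate(tokens):
--         if k % 2 == 0:
--             if k > 0:
--                 parts.append('" + ')
--             parts.append(tok)
--         else:
--             parts.append(' + "')
--             parts.append(tok)
--     if tokens and len(tokens) % 2 == 0:
--         parts.append('" ')
--     return ''.join(parts)
-- ===== Notes on version B (the rewrite author's own statement) =====
-- stated objective: idiomatic
-- what changed: Replaces the per-character state machine with repeated string concatenation by a two-pass tokenize-then-join: split the input into alternating identifier/filler runs, then emit the runs with the quote punctuation and join the pieces.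
import Mathlib
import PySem

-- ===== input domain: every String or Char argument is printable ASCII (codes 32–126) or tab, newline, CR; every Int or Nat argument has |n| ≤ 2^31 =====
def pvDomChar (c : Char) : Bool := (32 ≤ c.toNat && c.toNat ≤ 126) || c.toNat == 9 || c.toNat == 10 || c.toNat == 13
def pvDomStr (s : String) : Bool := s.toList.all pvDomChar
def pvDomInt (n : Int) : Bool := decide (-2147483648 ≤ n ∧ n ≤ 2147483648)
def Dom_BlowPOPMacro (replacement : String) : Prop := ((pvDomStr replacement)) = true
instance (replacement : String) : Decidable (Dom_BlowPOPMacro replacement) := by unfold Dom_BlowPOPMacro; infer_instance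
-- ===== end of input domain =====

-- B replaces A's per-character two-state machine (repeated string +=) by a two-pass
-- tokenize-into-runs then join-with-punctuation scheme; equal output, different decomposition.

-- ===== PORT A =====
-- isCID(ch): ch.isalnum() or ch == '_'
def isCID (ch : Char) : Bool := PySem.Chars.isalnum ch || ch == '_'

-- one step of A's loop body; state = (updatedStr as List Char, scanMode) with true = 'identifier'
def stepA (st : List Char × Bool) (ch : Char) : List Char × Bool :=
  if st.2 then
    if isCID ch then (st.1 ++ [ch], true)
    else (st.1 ++ (' ' :: '+' :: ' ' :: '"' :: [ch]), false)
  else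
    if !(PySem.Chars.isalpha ch || ch == '_') then (st.1 ++ [ch], false)
    else (st.1 ++ ('"' :: ' ' :: '+' :: ' ' :: [ch]), true)

def BlowPOPMacro (replacement : String) : String :=
  let st := replacement.toList.foldl stepA ([], true)
  String.mk (if st.2 then st.1 else st.1 ++ ['"', ' '])

-- ===== PORT B =====
-- identifier-run character: replacement[j].isalnum() or replacement[j] == '_'
def idCharB (ch : Char) : Bool := PySem.Chars.isalnum ch || ch == '_'
-- filler-run character: not (replacement[j].isalpha() or replacement[j] == '_')
def fillCharB (ch : Char) : Bool := !(PySem.Chars.isalpha ch || ch == '_')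

-- the inner 'while j < n and pred(replacement[j])' scan: (run, rest)
def spanRun (p : Char → Bool) : List Char → List Char × List Char
  | [] => ([], [])
  | c :: cs => if p c then let r := spanRun p cs; (c :: r.1, r.2) else ([], c :: cs)

lemma spanRun_snd_length_le (p : Char → Bool) : ∀ cs : List Char, (spanRun p cs).2.length ≤ cs.length := by
  intro cs
  induction cs with
  | nil => simp [spanRun]
  | cons c cs ih =>
      simp only [spanRun]
      split <;> simp <;> omega

-- pass 1 (tokenizer), after the first identifier run: alternating runs.  At every call the
-- head char satisfies the run's predicate (the previous run was maximal), so consuming it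
-- unconditionally is exactly Python B's re-test-and-scan.
mutual
def tokFiller : List Char → List (List Char)
  | [] => []
  | c :: cs => (c :: (spanRun fillCharB cs).1) :: tokIdent (spanRun fillCharB cs).2
  termination_by cs => cs.length
  decreasing_by exact Nat.lt_succ_of_le (spanRun_snd_length_le _ _)
def tokIdent : List Char → List (List Char)
  | [] => []
  | c :: cs => (c :: (spanRun idCharB cs).1) :: tokFiller (spanRun idCharB cs).2
  termination_by cs => cs.length
  decreasing_by exact Nat.lt_succ_of_le (spanRun_snd_length_le _ _)
end

-- pass 1 entry: while-loop runs only for nonempty input; first run is an identifier run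
def tokenize : List Char → List (List Char)
  | [] => []
  | c :: cs => (spanRun idCharB (c :: cs)).1 :: tokFiller (spanRun idCharB (c :: cs)).2

-- pass 2: the enumerate loop's k%2 / k>0 branching, as alternation on the token list
mutual
def buildFill : List (List Char) → List Char        -- k odd: ' + "' ++ tok
  | [] => []
  | t :: rest => (' ' :: '+' :: ' ' :: '"' :: []) ++ t ++ buildId rest
def buildId : List (List Char) → List Char          -- k even, k > 0: '" + ' ++ tok
  | [] => []
  | t :: rest => ('"' :: ' ' :: '+' :: ' ' :: []) ++ t ++ buildFill rest
end

def buildTok : List (List Char) → List Char         -- k = 0: tok alone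
  | [] => []
  | t :: rest => t ++ buildFill rest

def BlowPOPMacro_alt (replacement : String) : String :=
  let toks := tokenize replacement.toList
  String.mk (buildTok toks ++ (if !toks.isEmpty && toks.length % 2 == 0 then ['"', ' '] else []))

-- ===== PRECONDITION & SPEC =====
def Spec_BlowPOPMacro (replacement : String) (out : String) : Prop := out = BlowPOPMacro_alt replacement
instance (replacement : String) (out : String) : Decidable (Spec_BlowPOPMacro replacement out) := by unfold Spec_BlowPOPMacro; infer_instance

-- ===== CLAIM (what is proved, stated in full; the proofs are below) =====
def Claim_equal_BlowPOPMacro : Prop := ∀ (replacement : String), Dom_BlowPOPMacro replacement → Spec_BlowPOPMacro replacement (BlowPOPMacro replacement)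

-- ===== LEMMAS AND PROOFS =====

lemma stepA_shift (acc : List Char) (m : Bool) (ch : Char) :
    stepA (acc, m) ch = (acc ++ (stepA ([], m) ch).1, (stepA ([], m) ch).2) := by
  cases m <;> simp only [stepA] <;> split_ifs <;> simp

lemma foldl_stepA_shift : ∀ (cs acc : List Char) (m : Bool),
    List.foldl stepA (acc, m) cs =
      (acc ++ (List.foldl stepA ([], m) cs).1, (List.foldl stepA ([], m) cs).2) := by
  intro cs
  induction cs with
  | nil => intro acc m; simp
  | cons c cs ih =>
      intro acc m
      simp only [List.foldl_cons]
      rw [stepA_shift acc m c, ih (acc ++ (stepA ([], m) c).1) ((stepA ([], m) c).2),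
          ih ((stepA ([], m) c).1) ((stepA ([], m) c).2)]
      simp

lemma parity0 (k : Nat) : (((k + 1) % 2 == 0) : Bool) = (k % 2 == 1) := by
  rcases Nat.mod_two_eq_zero_or_one k with h | h <;> simp [Nat.add_mod, h]

lemma parity1 (k : Nat) : (((k + 1) % 2 == 1) : Bool) = (k % 2 == 0) := by
  rcases Nat.mod_two_eq_zero_or_one k with h | h <;> simp [Nat.add_mod, h]

lemma mainAF : ∀ n : Nat, ∀ cs : List Char, cs.length ≤ n →
    (List.foldl stepA ([], true) cs =
       ((spanRun idCharB cs).1 ++ buildFill (tokFiller (spanRun idCharB cs).2),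
        ((tokFiller (spanRun idCharB cs).2).length % 2 == 0)))
    ∧
    (List.foldl stepA ([], false) cs =
       ((spanRun fillCharB cs).1 ++ buildId (tokIdent (spanRun fillCharB cs).2),
        ((tokIdent (spanRun fillCharB cs).2).length % 2 == 1))) := by
  intro n
  induction n with
  | zero =>
      intro cs h
      have : cs = [] := List.eq_nil_of_length_eq_zero (Nat.le_zero.mp h)
      subst this
      simp [spanRun, tokFiller, tokIdent, buildFill, buildId]
  | succ n ih =>
      intro cs h
      cases cs with
      | nil => simp [spanRun, tokFiller, tokIdent, buildFill, buildId]
      | cons c r =>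
          have hr : r.length ≤ n := by simpa using Nat.lt_succ_iff.mp (by simpa using h)
          constructor
          · -- identifier mode
            by_cases hc : idCharB c = true
            · have hstep : stepA ([], true) c = ([c], true) := by
                have : isCID c = true := hc
                simp [stepA, this]
              simp only [List.foldl_cons, hstep, foldl_stepA_shift r [c] true,
                (ih r hr).1, spanRun, hc, if_pos]
              simp
            · have hstep : stepA ([], true) c = ((' ' :: '+' :: ' ' :: '"' :: [c]), false) := by
                simp [stepA, isCID, idCharB] at hc ⊢
                tauto
              simp only [List.foldl_cons, hstep,
                foldl_stepA_shift r (' ' :: '+' :: ' ' :: '"' :: [c]) false,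
                (ih r hr).2, spanRun, hc, if_neg, Bool.false_eq_true, not_false_iff]
              simp [tokFiller, buildFill, parity0]
          · -- filler mode
            by_cases hc : fillCharB c = true
            · have hstep : stepA ([], false) c = ([c], false) := by
                simp only [stepA, if_neg (by simp : ¬ ((([] : List Char), false).2 = true))]
                simp only [fillCharB] at hc
                simp [hc]
              simp only [List.foldl_cons, hstep, foldl_stepA_shift r [c] false,
                (ih r hr).2, spanRun, hc, if_pos]
              simp
            · have halpha : (PySem.Chars.isalpha c || c == '_') = true := by
                cases hb : (PySem.Chars.isalpha c || c == '_')
                · exact absurd (by simp [fillCharB, hb]) hc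
                · rfl
              have hstep : stepA ([], false) c = (('"' :: ' ' :: '+' :: ' ' :: [c]), true) := by
                simp [stepA, halpha]
              simp only [List.foldl_cons, hstep,
                foldl_stepA_shift r ('"' :: ' ' :: '+' :: ' ' :: [c]) true,
                (ih r hr).1, spanRun, hc, if_neg, Bool.false_eq_true, not_false_iff]
              simp [tokIdent, buildId, parity1]

lemma list_level : ∀ cs : List Char,
    (let st := List.foldl stepA ([], true) cs
     (if st.2 then st.1 else st.1 ++ ['"', ' '])) =
    (let toks := tokenize cs
     buildTok toks ++ (if !toks.isEmpty && toks.length % 2 == 0 then ['"', ' '] else [])) := by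
  intro cs
  cases cs with
  | nil => simp [tokenize, buildTok]
  | cons c r =>
      have hm := (mainAF (c :: r).length (c :: r) le_rfl).1
      simp only [hm, tokenize, buildTok]
      rcases Nat.mod_two_eq_zero_or_one (tokFiller (spanRun idCharB (c :: r)).2).length with h | h <;>
        simp [h, parity0, Nat.add_mod]

-- ===== VERDICT (by name: the statement is the Claim_ definition above) =====
theorem BlowPOPMacro_spec : Claim_equal_BlowPOPMacro := by
  intro replacement _
  unfold Spec_BlowPOPMacro BlowPOPMacro BlowPOPMacro_alt
  exact congrArg String.mk (list_level replacement.toList)
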